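-- pv_equiv track=rewrite | github.com/nomadlife/python-exercise | Puzzle/blocks.py | shape2data
-- ===== SOURCE A (Python) =====
-- def shape2data(shape):
--     shape_number = []
--     position = 1
--     for s in shape:
--         if s == 'o':
--             shape_number.append(position)
--             position += 1
--         elif s == 'x':
--             position += 1
--         elif s == ';':
--             if position <= 8: position = 9
--             elif position <= 16: position = 17
--             elif position <= 24: position = 25
--             elif position <= 32: position = 33
--             elif position <= 40: position = 41
--     return tuple(shape_number)
-- ===== SOURCE B (Python) =====
-- def shape2data(shape):
--     def offsets(base, row):
--         cells = [c for c in row if c in ('o', 'x')]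
--         occ = [base + i for i, c in enumerate(cells) if c == 'o']
--         return occ, base + len(cells)
--
--     first, *rest = shape.split(';')
--     result, base = offsets(1, first)
--     for row in rest:
--         if base <= 40:
--             base += 8 - (base - 1) % 8
--         occ, base = offsets(base, row)
--         result += occ
--     return tuple(result)
-- ===== Notes on version B (the rewrite author's own statement) =====
-- stated objective: alternative
-- what changed: B replaces A's character-by-character state machine by a per-row decomposition: it splits on the row separator, filters each row down to its o/x cells, computes the occupied offsets arithmetically with enumerate over the filtered cells, advances the base by the cell count, and rounds the base with a modular formula between rows instead of A's five-way if/elif chain.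
import Mathlib
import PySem

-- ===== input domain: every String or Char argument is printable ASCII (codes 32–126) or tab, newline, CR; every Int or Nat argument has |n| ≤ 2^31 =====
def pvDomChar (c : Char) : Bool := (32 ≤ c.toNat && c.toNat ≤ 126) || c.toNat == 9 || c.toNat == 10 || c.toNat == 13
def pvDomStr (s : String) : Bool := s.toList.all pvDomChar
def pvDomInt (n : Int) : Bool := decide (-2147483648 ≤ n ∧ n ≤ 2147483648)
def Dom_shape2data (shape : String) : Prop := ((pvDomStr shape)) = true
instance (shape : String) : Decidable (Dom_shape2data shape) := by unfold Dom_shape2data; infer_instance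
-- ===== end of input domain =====

-- B processes the shape row by row: it splits on ';', filters each row down to its o/x cells,
-- computes the occupied offsets arithmetically from enumerate over the cells, and rounds the
-- running base with a modular formula between rows (alternative decomposition).

-- ===== PORT A =====
-- one step of A's loop body over (shape_number, position)
def pvStepA (st : List Int × Int) (s : Char) : List Int × Int :=
  if s = 'o' then (st.1 ++ [st.2], st.2 + 1)
  else if s = 'x' then (st.1, st.2 + 1)
  else if s = ';' then
    (st.1,
      if st.2 ≤ 8 then 9
      else if st.2 ≤ 16 then 17
      else if st.2 ≤ 24 then 25
      else if st.2 ≤ 32 then 33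
      else if st.2 ≤ 40 then 41
      else st.2)
  else st

def shape2data (shape : String) : List Int :=
  (shape.toList.foldl pvStepA (([] : List Int), (1 : Int))).1

-- ===== PORT B =====
-- shape.split(';') on the character list (Python str.split with a one-char separator: empty
-- segments kept; exact hand port)
def pvSplitSemi : List Char → List (List Char)
  | [] => [[]]
  | c :: l =>
    if c = ';' then [] :: pvSplitSemi l
    else
      match pvSplitSemi l with
      | [] => [[c]]
      | s :: ss => (c :: s) :: ss

-- Source B's offsets(base, row): filter the row to its o/x cells, enumerate them, keep the 'o'
-- indices shifted by base, and return the advanced base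
def pvOffsets (base : Int) (row : List Char) : List Int × Int :=
  let cells := row.filter (fun c => c == 'o' || c == 'x')
  (((PySem.List.enumerate cells).filter (fun q => q.2 == 'o')).map (fun q => base + q.1),
   base + cells.length)

-- one iteration of Source B's row loop: round the base, then process the row
def pvRowB (st : List Int × Int) (row : List Char) : List Int × Int :=
  let base := if st.2 ≤ 40 then st.2 + (8 - PySem.Int.mod (st.2 - 1) 8) else st.2
  let o := pvOffsets base row
  (st.1 ++ o.1, o.2)

def shape2data_alt (shape : String) : List Int :=
  match pvSplitSemi shape.toList with
  | [] => []
  | first :: rest =>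
    (rest.foldl pvRowB (pvOffsets 1 first)).1

-- ===== PRECONDITION & SPEC =====
def Spec_shape2data (shape : String) (out : List Int) : Prop := out = shape2data_alt shape
instance (shape : String) (out : List Int) : Decidable (Spec_shape2data shape out) := by unfold Spec_shape2data; infer_instance

-- ===== CLAIM =====
def Claim_equal_shape2data : Prop := ∀ (shape : String), Dom_shape2data shape → Spec_shape2data shape (shape2data shape)

-- ===== LEMMAS AND PROOFS =====

-- shifting the enumerate start is the same as shifting the added base
theorem pvOffMap (cells : List Char) (s₁ s₂ t₁ t₂ : Int) (h : t₁ + s₁ = t₂ + s₂) :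
    ((PySem.List.enumerate cells s₁).filter (fun q => q.2 == 'o')).map (fun q => t₁ + q.1)
      = ((PySem.List.enumerate cells s₂).filter (fun q => q.2 == 'o')).map (fun q => t₂ + q.1) := by
  induction cells generalizing s₁ s₂ with
  | nil => simp [PySem.List.enumerate]
  | cons c cs ih =>
    rw [PySem.List.enumerate_cons, PySem.List.enumerate_cons]
    by_cases hc : (c == 'o') = true
    · simp only [List.filter_cons, hc, if_pos, List.map_cons]
      exact congrArg₂ _ h (ih (s₁+1) (s₂+1) (by omega))
    · simp only [List.filter_cons, hc, Bool.false_eq_true, if_false]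
      exact ih (s₁+1) (s₂+1) (by omega)

theorem pvOffsets_cons_o (row : List Char) (p : Int) :
    pvOffsets p ('o' :: row) = (p :: (pvOffsets (p+1) row).1, (pvOffsets (p+1) row).2) := by
  unfold pvOffsets
  simp only [List.filter_cons]
  norm_num
  constructor
  · exact pvOffMap (row.filter (fun c => c == 'o' || c == 'x')) 1 0 p (p+1) (by omega)
  · ring

theorem pvOffsets_cons_x (row : List Char) (p : Int) :
    pvOffsets p ('x' :: row) = pvOffsets (p+1) row := by
  unfold pvOffsets
  simp only [List.filter_cons]
  norm_num
  simp only [List.filter_cons]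
  norm_num
  constructor
  · exact pvOffMap (row.filter (fun c => c == 'o' || c == 'x')) 1 0 p (p+1) (by omega)
  · ring

theorem pvOffsets_cons_other (c : Char) (row : List Char) (p : Int)
    (ho : c ≠ 'o') (hx : c ≠ 'x') :
    pvOffsets p (c :: row) = pvOffsets p row := by
  unfold pvOffsets
  simp [ho, hx]

-- A's if/elif rounding chain equals B's modular rounding for positions ≥ 1
theorem pvRoundB_eq (p : Int) (hp : 1 ≤ p) :
    (if p ≤ 8 then (9 : Int)
     else if p ≤ 16 then 17
     else if p ≤ 24 then 25
     else if p ≤ 32 then 33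
     else if p ≤ 40 then 41
     else p)
      = (if p ≤ 40 then p + (8 - PySem.Int.mod (p - 1) 8) else p) := by
  rw [PySem.Int.mod_eq_emod_of_pos (by omega : (0:Int) < 8)]
  have h8 := Int.emod_nonneg (p - 1) (by omega : (8:Int) ≠ 0)
  have h8' := Int.emod_lt_of_pos (p - 1) (by omega : (0:Int) < 8)
  have := Int.emod_emod_of_dvd (p - 1) (dvd_refl (8:Int))
  split_ifs <;> omega

theorem pvRoundB_pos (p : Int) (hp : 1 ≤ p) :
    1 ≤ (if p ≤ 40 then p + (8 - PySem.Int.mod (p - 1) 8) else p) := by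
  rw [PySem.Int.mod_eq_emod_of_pos (by omega : (0:Int) < 8)]
  have h8' := Int.emod_lt_of_pos (p - 1) (by omega : (0:Int) < 8)
  split_ifs <;> omega

theorem pvStepA_pos (st : List Int × Int) (c : Char) (hc : c ≠ ';') (h : 1 ≤ st.2) :
    1 ≤ (pvStepA st c).2 := by
  unfold pvStepA
  split_ifs <;> first | exact h | (dsimp only; omega)

theorem pvSplitSemi_ne_nil (l : List Char) : pvSplitSemi l ≠ [] := by
  cases l with
  | nil => simp [pvSplitSemi]
  | cons c l =>
    unfold pvSplitSemi
    split_ifs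
    · simp
    · cases h : pvSplitSemi l <;> simp

-- one non-';' step of A equals prepending that character's cell to B's row computation
theorem pvOffsets_step (c : Char) (row : List Char) (acc : List Int) (p : Int) (hc : c ≠ ';') :
    (acc ++ (pvOffsets p (c :: row)).1, (pvOffsets p (c :: row)).2)
      = ((pvStepA (acc, p) c).1 ++ (pvOffsets (pvStepA (acc, p) c).2 row).1,
         (pvOffsets (pvStepA (acc, p) c).2 row).2) := by
  by_cases ho : c = 'o'
  · subst ho
    simp [pvStepA, pvOffsets_cons_o]
  · by_cases hx : c = 'x'
    · subst hx
      simp [pvStepA, pvOffsets_cons_x]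
    · simp [pvStepA, ho, hx, hc, pvOffsets_cons_other c row p ho hx]

-- main loop equivalence: A's single character pass equals B's split + per-row computation
theorem pvMain (l : List Char) (acc : List Int) (p : Int) (h : 1 ≤ p) :
    l.foldl pvStepA (acc, p) =
      (match pvSplitSemi l with
       | [] => (acc, p)
       | first :: rest =>
         rest.foldl pvRowB (acc ++ (pvOffsets p first).1, (pvOffsets p first).2)) := by
  induction l generalizing acc p with
  | nil => simp [pvSplitSemi, pvOffsets]
  | cons c l ih =>
    by_cases hc : c = ';'
    · subst hc
      have hstep : pvStepA (acc, p) ';' =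
          (acc, if p ≤ 40 then p + (8 - PySem.Int.mod (p - 1) 8) else p) := by
        rw [← pvRoundB_eq p h]; rfl
      have hrec := ih acc _ (pvRoundB_pos p h)
      cases hsp : pvSplitSemi l with
      | nil => exact absurd hsp (pvSplitSemi_ne_nil l)
      | cons s ss =>
        simp only [hsp] at hrec
        have hsp2 : pvSplitSemi (';' :: l) = [] :: s :: ss := by
          simp [pvSplitSemi, hsp]
        simp only [List.foldl_cons, hstep, hrec, hsp2]
        simp [pvRowB, pvOffsets]
    · have hrec := ih (pvStepA (acc, p) c).1 (pvStepA (acc, p) c).2 (pvStepA_pos _ c hc h)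
      simp only [List.foldl_cons]
      rw [show pvStepA (acc, p) c = ((pvStepA (acc, p) c).1, (pvStepA (acc, p) c).2) from rfl,
        hrec]
      cases hsp : pvSplitSemi l with
      | nil => exact absurd hsp (pvSplitSemi_ne_nil l)
      | cons s ss =>
        simp only [pvSplitSemi, hc, if_false, hsp]
        rw [← pvOffsets_step c s acc p hc]

-- ===== VERDICT =====
theorem shape2data_spec : Claim_equal_shape2data := by
  intro shape _
  unfold Spec_shape2data shape2data shape2data_alt
  rw [pvMain shape.toList ([] : List Int) 1 (by norm_num)]
  cases hsp : pvSplitSemi shape.toList with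
  | nil => exact absurd hsp (pvSplitSemi_ne_nil _)
  | cons s ss => simp
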